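-- pv_equiv track=rewrite | github.com/aveith/simulator-stream-processing | scripts/informs/lib/save_file.py | get_final_costs
-- ===== SOURCE A (Python) =====
-- def get_final_costs(vertice_costs=[], stream_costs=[],
--                     vertices=[], streams=[], links=[],
--                     hosts=[]):
--     v = []
--     s = []
--     for i in range(len(hosts)):
--         lv = []
--         for j in range(len(vertices)):
--             find = False
--             for k in range(len(vertice_costs)):
--                 if vertice_costs[k][0] == vertices[j][0] and vertice_costs[k][1] == hosts[i][0]:
--                     lv.append(vertice_costs[k][2])
--                     find = True
--                     break
--             if not find:
--                 lv.append(0)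
--
--         v.append(lv)
--
--     for i in range(len(links)):
--         ls = []
--         for j in range(len(streams)):
--             find = False
--             for k in range(len(stream_costs)):
--                 if stream_costs[k][0] == streams[j][0] and stream_costs[k][1] == streams[j][1] and stream_costs[k][2] == \
--                         links[i][0] and stream_costs[k][3] == links[i][1]:
--                     find = True
--                     ls.append(stream_costs[k][4])
--                     break
--             if not find:
--                 ls.append(0)
--         s.append(ls)
--
--     return v, s
-- ===== SOURCE B (Python) =====
-- def _build_index(keys):
--     d = {}
--     for i, k in enumerate(keys):
--         d.setdefault(k, []).append(i)
--     return d
--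
--
-- def _match_matrix(row_items, row_key, col_keys, records, rkey, ckey, vkey):
--     cols = _build_index(col_keys)
--     grid = [[None] * len(col_keys) for _ in row_items]
--     rows = None
--     for rec in records:
--         js = cols.get(ckey(rec))
--         if not js:
--             continue
--         if rows is None:
--             rows = _build_index([row_key(x) for x in row_items])
--         is_ = rows.get(rkey(rec))
--         if not is_:
--             continue
--         val = vkey(rec)
--         for i in is_:
--             for j in js:
--                 if grid[i][j] is None:
--                     grid[i][j] = val
--     return [[0 if x is None else x for x in row] for row in grid]
--
--
-- def get_final_costs(vertice_costs=[], stream_costs=[],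
--                     vertices=[], streams=[], links=[],
--                     hosts=[]):
--     if vertice_costs and vertices and hosts:
--         v = _match_matrix(hosts, lambda h: h[0],
--                           [vr[0] for vr in vertices], vertice_costs,
--                           lambda r: r[1], lambda r: r[0], lambda r: r[2])
--     else:
--         v = [[0] * len(vertices) for _ in hosts]
--     if stream_costs and streams and links:
--         s = _match_matrix(links, lambda l: (l[0], l[1]),
--                           [(sr[0], sr[1]) for sr in streams], stream_costs,
--                           lambda r: (r[2], r[3]), lambda r: (r[0], r[1]),
--                           lambda r: r[4])
--     else:
--         s = [[0] * len(streams) for _ in links]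
--     return v, s
-- ===== Notes on version B (the rewrite author's own statement) =====
-- stated objective: faster
-- what changed: A scans the whole cost-record list once per matrix cell (nested host x vertex x records loops); B builds hash indexes from each key to its list of positions, allocates a None-initialised grid, and does a single scatter pass over the cost records, filling each still-empty matching cell (first record wins, like A's break).
-- outside the precondition, e.g. on get_final_costs([[1, 0, 5], []], [], [[1]], [], [], [[0]]): A returns ([[5]], []), B raises IndexError; on get_final_costs([], [[7]], [], [[1, 2]], [[1, 2]], []): A returns ([], [[0]]), B raises IndexError
import Mathlib
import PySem

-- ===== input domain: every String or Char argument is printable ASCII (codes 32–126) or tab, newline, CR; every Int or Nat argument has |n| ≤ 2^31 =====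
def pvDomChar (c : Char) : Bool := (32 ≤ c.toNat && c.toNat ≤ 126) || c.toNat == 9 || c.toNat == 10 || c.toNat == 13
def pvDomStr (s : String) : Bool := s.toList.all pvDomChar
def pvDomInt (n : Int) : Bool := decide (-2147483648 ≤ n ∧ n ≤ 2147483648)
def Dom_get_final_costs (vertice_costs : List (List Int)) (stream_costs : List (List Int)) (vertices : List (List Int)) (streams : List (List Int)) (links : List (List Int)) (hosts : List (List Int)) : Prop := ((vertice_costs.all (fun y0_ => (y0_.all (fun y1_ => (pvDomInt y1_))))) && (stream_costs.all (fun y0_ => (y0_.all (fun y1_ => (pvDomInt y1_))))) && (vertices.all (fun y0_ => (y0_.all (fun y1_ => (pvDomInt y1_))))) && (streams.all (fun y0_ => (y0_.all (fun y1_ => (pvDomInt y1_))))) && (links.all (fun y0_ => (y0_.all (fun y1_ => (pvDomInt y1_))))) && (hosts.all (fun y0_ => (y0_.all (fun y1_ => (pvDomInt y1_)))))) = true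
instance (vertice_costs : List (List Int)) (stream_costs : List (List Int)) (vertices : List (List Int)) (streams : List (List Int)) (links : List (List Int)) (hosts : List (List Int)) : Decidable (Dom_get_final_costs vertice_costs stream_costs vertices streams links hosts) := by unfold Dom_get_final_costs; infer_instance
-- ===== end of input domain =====

-- ===== PORT A =====
-- B replaces A's per-cell scan of the cost records by position indexes plus one scatter pass over the records.
-- Both ports write Python's r[c] as r.getD c 0: exact under Pre_ (rows are long enough wherever the Python reads them).
-- inner `for k` loop of A with break: first record matching the (vertex, host) pair
def pvFindV : List (List Int) → List Int → List Int → Option Int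
  | [], _, _ => none
  | r :: rest, vr, h =>
    if r.getD 0 0 = vr.getD 0 0 ∧ r.getD 1 0 = h.getD 0 0 then some (r.getD 2 0)
    else pvFindV rest vr h

-- inner `for k` loop of A with break: first record matching the (stream, link) pair
def pvFindS : List (List Int) → List Int → List Int → Option Int
  | [], _, _ => none
  | r :: rest, sr, l =>
    if r.getD 0 0 = sr.getD 0 0 ∧ r.getD 1 0 = sr.getD 1 0 ∧ r.getD 2 0 = l.getD 0 0 ∧
       r.getD 3 0 = l.getD 1 0 then some (r.getD 4 0)
    else pvFindS rest sr l

def get_final_costs (vertice_costs : List (List Int)) (stream_costs : List (List Int)) (vertices : List (List Int)) (streams : List (List Int)) (links : List (List Int)) (hosts : List (List Int)) : List (List Int) × List (List Int) :=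
  (hosts.map (fun h => vertices.map (fun vr => (pvFindV vertice_costs vr h).getD 0)),
   links.map (fun l => streams.map (fun sr => (pvFindS stream_costs sr l).getD 0)))

-- ===== PORT B =====
-- Source B `_build_index`: key -> list of positions (Python enumerate indices are ints)
def pvBuildIndex {kk : Type} [BEq kk] (keys : List kk) : PySem.Dict kk (List Int) :=
  (PySem.List.enumerate keys).foldl
    (fun d p => d.modify p.2 [] (fun is => is ++ [p.1])) PySem.Dict.empty

-- body of Source B's `for rec in records` loop: state = (grid, lazily built row index)
def pvScatterStep {rho kr kc : Type} [BEq kr] [BEq kc]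
    (cols : PySem.Dict kc (List Int)) (rowKeys : List kr)
    (rkey : rho → kr) (ckey : rho → kc) (vkey : rho → Int)
    (st : List (List (Option Int)) × Option (PySem.Dict kr (List Int))) (rec : rho) :
    List (List (Option Int)) × Option (PySem.Dict kr (List Int)) :=
  let js := cols.getD (ckey rec) []
  if js = [] then st
  else
    let rows := match st.2 with
      | some d => d
      | none => pvBuildIndex rowKeys
    let is_ := rows.getD (rkey rec) []
    if is_ = [] then (st.1, some rows)
    else
      let val := vkey rec
      (is_.foldl (fun g i =>
          js.foldl (fun g j =>
            g.modify i.toNat (fun row => row.modify j.toNat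
              (fun c => if c.isNone then some val else c))) g) st.1,
       some rows)

-- Source B `_match_matrix`: column index, None-initialised grid, scatter pass (row index built on first hit), None -> 0
def pvMatchMatrix {alpha rho kr kc : Type} [BEq kr] [BEq kc]
    (rowItems : List alpha) (rowKey : alpha → kr) (colKeys : List kc) (records : List rho)
    (rkey : rho → kr) (ckey : rho → kc) (vkey : rho → Int) : List (List Int) :=
  let cols := pvBuildIndex colKeys
  let grid0 : List (List (Option Int)) := rowItems.map (fun _ => colKeys.map (fun _ => (none : Option Int)))
  let st := records.foldl (pvScatterStep cols (rowItems.map rowKey) rkey ckey vkey) (grid0, none)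
  st.1.map (fun row => row.map (fun c => c.getD 0))

def get_final_costs_alt (vertice_costs : List (List Int)) (stream_costs : List (List Int)) (vertices : List (List Int)) (streams : List (List Int)) (links : List (List Int)) (hosts : List (List Int)) : List (List Int) × List (List Int) :=
  (if vertice_costs ≠ [] ∧ vertices ≠ [] ∧ hosts ≠ [] then
      pvMatchMatrix hosts (fun h => h.getD 0 0) (vertices.map (fun vr => vr.getD 0 0)) vertice_costs
        (fun r => r.getD 1 0) (fun r => r.getD 0 0) (fun r => r.getD 2 0)
    else hosts.map (fun _ => vertices.map (fun _ => (0 : Int))),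
   if stream_costs ≠ [] ∧ streams ≠ [] ∧ links ≠ [] then
      pvMatchMatrix links (fun l => (l.getD 0 0, l.getD 1 0))
        (streams.map (fun sr => (sr.getD 0 0, sr.getD 1 0))) stream_costs
        (fun r => (r.getD 2 0, r.getD 3 0)) (fun r => (r.getD 0 0, r.getD 1 0)) (fun r => r.getD 4 0)
    else links.map (fun _ => streams.map (fun _ => (0 : Int))))

-- ===== PRECONDITION & SPEC =====
-- Pre_ asks, on each side that has matching work to do (costs, rows and columns all nonempty), that every row field
-- either program actually reads exists: basic fields always read, further cost-record fields only when the record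
-- (partially) matches some entity. Outside Pre_ the Python A raises IndexError on a malformed row, or returns only
-- because its lazy `and` chain / break happens to skip the malformed field while B's index build still reads it.
def Pre_get_final_costs (vertice_costs : List (List Int)) (stream_costs : List (List Int)) (vertices : List (List Int)) (streams : List (List Int)) (links : List (List Int)) (hosts : List (List Int)) : Prop :=
  (vertice_costs ≠ [] ∧ vertices ≠ [] ∧ hosts ≠ [] →
    (∀ r ∈ vertice_costs, r ≠ []) ∧ (∀ vr ∈ vertices, vr ≠ []) ∧
    (∀ r ∈ vertice_costs, (∃ vr ∈ vertices, r.getD 0 0 = vr.getD 0 0) → 2 ≤ r.length) ∧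
    ((∃ r ∈ vertice_costs, ∃ vr ∈ vertices, r.getD 0 0 = vr.getD 0 0) → ∀ h ∈ hosts, h ≠ []) ∧
    (∀ r ∈ vertice_costs,
      (∃ vr ∈ vertices, r.getD 0 0 = vr.getD 0 0) → (∃ h ∈ hosts, r.getD 1 0 = h.getD 0 0) →
      3 ≤ r.length)) ∧
  (stream_costs ≠ [] ∧ streams ≠ [] ∧ links ≠ [] →
    (∀ r ∈ stream_costs, 2 ≤ r.length) ∧ (∀ sr ∈ streams, 2 ≤ sr.length) ∧
    (∀ r ∈ stream_costs,
      (∃ sr ∈ streams, r.getD 0 0 = sr.getD 0 0 ∧ r.getD 1 0 = sr.getD 1 0) → 4 ≤ r.length) ∧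
    ((∃ r ∈ stream_costs, ∃ sr ∈ streams, r.getD 0 0 = sr.getD 0 0 ∧ r.getD 1 0 = sr.getD 1 0) →
      ∀ l ∈ links, 2 ≤ l.length) ∧
    (∀ r ∈ stream_costs,
      (∃ sr ∈ streams, r.getD 0 0 = sr.getD 0 0 ∧ r.getD 1 0 = sr.getD 1 0) →
      (∃ l ∈ links, r.getD 2 0 = l.getD 0 0 ∧ r.getD 3 0 = l.getD 1 0) →
      5 ≤ r.length))
instance (vertice_costs : List (List Int)) (stream_costs : List (List Int)) (vertices : List (List Int)) (streams : List (List Int)) (links : List (List Int)) (hosts : List (List Int)) : Decidable (Pre_get_final_costs vertice_costs stream_costs vertices streams links hosts) := by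
  unfold Pre_get_final_costs
  exact instDecidableAnd (dp := by infer_instance) (dq := by infer_instance)

def pvWitness_get_final_costs : List (List Int) × List (List Int) × List (List Int) × List (List Int) × List (List Int) × List (List Int) :=
  ([[1, 0, 7]], [[1, 2, 3, 4, 9]], [[1]], [[1, 2]], [[3, 4]], [[0]])

def Spec_get_final_costs (vertice_costs : List (List Int)) (stream_costs : List (List Int)) (vertices : List (List Int)) (streams : List (List Int)) (links : List (List Int)) (hosts : List (List Int)) (out : List (List Int) × List (List Int)) : Prop := out = get_final_costs_alt vertice_costs stream_costs vertices streams links hosts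
instance (vertice_costs : List (List Int)) (stream_costs : List (List Int)) (vertices : List (List Int)) (streams : List (List Int)) (links : List (List Int)) (hosts : List (List Int)) (out : List (List Int) × List (List Int)) : Decidable (Spec_get_final_costs vertice_costs stream_costs vertices streams links hosts out) := by unfold Spec_get_final_costs; infer_instance

-- ===== CLAIM (what is proved, stated in full; the proofs are below) =====
def Claim_equal_get_final_costs : Prop := ∀ (vertice_costs : List (List Int)) (stream_costs : List (List Int)) (vertices : List (List Int)) (streams : List (List Int)) (links : List (List Int)) (hosts : List (List Int)), Dom_get_final_costs vertice_costs stream_costs vertices streams links hosts → Pre_get_final_costs vertice_costs stream_costs vertices streams links hosts → Spec_get_final_costs vertice_costs stream_costs vertices streams links hosts (get_final_costs vertice_costs stream_costs vertices streams links hosts)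

-- ===== LEMMAS AND PROOFS =====
-- (the Lean ports are total via getD, so the equality below in fact holds without the Pre_ hypothesis;
-- Pre_ is there because the PYTHON programs raise IndexError outside it)

-- abstract "first matching record" that both ports compute per cell
def pvFirstMatch {kr kc : Type} [DecidableEq kr] [DecidableEq kc] :
    List (kr × kc × Int) → kr → kc → Option Int
  | [], _, _ => none
  | r :: rest, rk, ck => if r.1 = rk ∧ r.2.1 = ck then some r.2.2 else pvFirstMatch rest rk ck

theorem pvFirstMatch_append {kr kc : Type} [DecidableEq kr] [DecidableEq kc]
    (p : List (kr × kc × Int)) (r : kr × kc × Int) (rk : kr) (ck : kc) :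
    pvFirstMatch (p ++ [r]) rk ck =
      if r.1 = rk ∧ r.2.1 = ck then
        (if (pvFirstMatch p rk ck).isNone then some r.2.2 else pvFirstMatch p rk ck)
      else pvFirstMatch p rk ck := by
  induction p with
  | nil => simp [pvFirstMatch]
  | cons q rest ih =>
    simp only [List.cons_append, pvFirstMatch, ih]
    split_ifs <;> simp_all

theorem pvFoldl_modify_char {alpha : Type} (f : alpha → alpha) (hf : ∀ a, f (f a) = f a)
    (L : List Int) (xs : List alpha) (n : Nat) :
    (L.foldl (fun xs i => xs.modify i.toNat f) xs)[n]? =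
      if ∃ i ∈ L, i.toNat = n then (xs[n]?).map f else xs[n]? := by
  induction L generalizing xs with
  | nil => simp
  | cons i0 rest ih =>
    simp only [List.foldl_cons, ih, List.getElem?_modify, List.mem_cons]
    by_cases h0 : i0.toNat = n
    · subst h0
      by_cases hr : ∃ i ∈ rest, i.toNat = i0.toNat <;>
        simp [hr] <;> cases xs[i0.toNat]? <;> simp [hf]
    · by_cases hr : ∃ i ∈ rest, i.toNat = n <;> simp [hr, h0]

theorem pvMem_buildIndex {kk : Type} [BEq kk] [LawfulBEq kk] (keys : List kk) (k : kk) (i : Int) :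
    i ∈ (pvBuildIndex keys).getD k [] ↔ 0 ≤ i ∧ keys[i.toNat]? = some k := by
  have h : pvBuildIndex keys
      = ((PySem.List.enumerate keys).map (fun p => (p.2, p.1))).foldl
          (fun d p => d.modify p.1 [] (fun is => is ++ [p.2])) PySem.Dict.empty := by
    rw [List.foldl_map]; rfl
  rw [h, PySem.Dict.getD_foldl_modify_append]
  simp only [PySem.Dict.getD_empty, List.nil_append]
  constructor
  · intro hmem
    obtain ⟨p, hpf, rfl⟩ := List.mem_map.mp hmem
    obtain ⟨hpm, hbeq⟩ := List.mem_filter.mp hpf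
    obtain ⟨q, hqe, rfl⟩ := List.mem_map.mp hpm
    obtain ⟨j, hj, rfl⟩ := (PySem.List.mem_enumerate_iff _ _ _).mp hqe
    have hk : keys[j] = k := by simpa using hbeq
    refine ⟨by simp, ?_⟩
    simpa [hk] using List.getElem?_eq_some_iff.mpr ⟨hj, hk⟩
  · rintro ⟨hi, hget⟩
    have hlt : i.toNat < keys.length := (List.getElem?_eq_some_iff.mp hget).1
    have hkeq : keys[i.toNat] = k := (List.getElem?_eq_some_iff.mp hget).2
    apply List.mem_map.mpr
    refine ⟨(k, i), ?_, rfl⟩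
    apply List.mem_filter.mpr
    refine ⟨?_, by simp⟩
    apply List.mem_map.mpr
    refine ⟨(i, k), ?_, rfl⟩
    apply (PySem.List.mem_enumerate_iff _ _ _).mpr
    exact ⟨i.toNat, hlt, by simp [hkeq, Int.toNat_of_nonneg hi]⟩

-- cell update of the scatter pass
def pvUpd (v : Int) (c : Option Int) : Option Int := if c.isNone then some v else c

theorem pvUpd_idem (v : Int) (c : Option Int) : pvUpd v (pvUpd v c) = pvUpd v c := by
  cases c <;> rfl

-- row transform applied at a hit row index
def pvRowT (L2 : List Int) (v : Int) (row : List (Option Int)) : List (Option Int) :=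
  L2.foldl (fun row j => row.modify j.toNat (pvUpd v)) row

theorem pvRowT_get (L2 : List Int) (v : Int) (row : List (Option Int)) (n : Nat) :
    (pvRowT L2 v row)[n]? =
      if ∃ j ∈ L2, j.toNat = n then (row[n]?).map (pvUpd v) else row[n]? :=
  pvFoldl_modify_char (pvUpd v) (pvUpd_idem v) L2 row n

theorem pvRowT_idem (L2 : List Int) (v : Int) (row : List (Option Int)) :
    pvRowT L2 v (pvRowT L2 v row) = pvRowT L2 v row := by
  apply List.ext_getElem?
  intro n
  simp only [pvRowT_get]
  split_ifs with h
  · cases row[n]? <;> simp [pvUpd_idem]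
  · rfl

theorem pvInner_eq {kc : Type} [BEq kc] (cols : PySem.Dict kc (List Int)) (ck : kc) (i : Nat) (v : Int)
    (g : List (List (Option Int))) :
    (cols.getD ck []).foldl (fun g j =>
        g.modify i (fun row => row.modify j.toNat (pvUpd v))) g
      = g.modify i (pvRowT (cols.getD ck []) v) := by
  generalize cols.getD ck [] = L2
  induction L2 generalizing g with
  | nil =>
    show g = g.modify i (pvRowT [] v)
    have : pvRowT [] v = id := rfl
    rw [this, List.modify_id]
  | cons j0 rest ih =>
    simp only [List.foldl_cons, ih, List.modify_modify_eq]
    rfl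

-- grid of per-cell first matches after processing a prefix of the records
def pvG {kr kc : Type} [DecidableEq kr] [DecidableEq kc] (rowKeys : List kr) (colKeys : List kc)
    (p : List (kr × kc × Int)) : List (List (Option Int)) :=
  rowKeys.map (fun rk => colKeys.map (fun ck => pvFirstMatch p rk ck))

theorem pvStep_G {kr kc : Type} [BEq kr] [LawfulBEq kr] [DecidableEq kr]
    [BEq kc] [LawfulBEq kc] [DecidableEq kc]
    (rowKeys : List kr) (colKeys : List kc) (p : List (kr × kc × Int)) (r : kr × kc × Int) :
    ((pvBuildIndex rowKeys).getD r.1 []).foldl (fun g i =>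
        ((pvBuildIndex colKeys).getD r.2.1 []).foldl (fun g j =>
          g.modify i.toNat (fun row => row.modify j.toNat (pvUpd r.2.2))) g)
      (pvG rowKeys colKeys p)
      = pvG rowKeys colKeys (p ++ [r]) := by
  have hrw : ∀ (g : List (List (Option Int))) (i : Int),
      ((pvBuildIndex colKeys).getD r.2.1 []).foldl (fun g j =>
          g.modify i.toNat (fun row => row.modify j.toNat (pvUpd r.2.2))) g
        = g.modify i.toNat (pvRowT ((pvBuildIndex colKeys).getD r.2.1 []) r.2.2) :=
    fun g i => pvInner_eq _ _ _ _ g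
  simp only [hrw]
  apply List.ext_getElem?
  intro i'
  rw [pvFoldl_modify_char _ (pvRowT_idem _ _) _ _ i']
  cases hrow : rowKeys[i']? with
  | none =>
    have h1 : (pvG rowKeys colKeys p)[i']? = none := by simp [pvG, hrow]
    have h2 : (pvG rowKeys colKeys (p ++ [r]))[i']? = none := by simp [pvG, hrow]
    simp [h1, h2]
  | some rk =>
    have h1 : (pvG rowKeys colKeys p)[i']? = some (colKeys.map (fun ck => pvFirstMatch p rk ck)) := by
      simp [pvG, hrow]
    have h2 : (pvG rowKeys colKeys (p ++ [r]))[i']?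
        = some (colKeys.map (fun ck => pvFirstMatch (p ++ [r]) rk ck)) := by
      simp [pvG, hrow]
    have hcond : (∃ i ∈ (pvBuildIndex rowKeys).getD r.1 [], i.toNat = i') ↔ rk = r.1 := by
      constructor
      · rintro ⟨i, hi, rfl⟩
        obtain ⟨-, hget⟩ := (pvMem_buildIndex rowKeys r.1 i).mp hi
        rw [hrow] at hget
        exact Option.some.inj hget
      · intro hkk
        exact ⟨(i' : Int), (pvMem_buildIndex rowKeys r.1 (i' : Int)).mpr
          (by simp [hrow, hkk]), by simp⟩
    by_cases hk : rk = r.1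
    · rw [if_pos (hcond.mpr hk), h1, h2]
      simp only [Option.map_some, Option.some.injEq]
      apply List.ext_getElem?
      intro j'
      rw [pvRowT_get]
      cases hcol : colKeys[j']? with
      | none => simp [hcol]
      | some ck =>
        have hcond2 : (∃ j ∈ (pvBuildIndex colKeys).getD r.2.1 [], j.toNat = j') ↔ ck = r.2.1 := by
          constructor
          · rintro ⟨j, hj, rfl⟩
            obtain ⟨-, hget⟩ := (pvMem_buildIndex colKeys r.2.1 j).mp hj
            rw [hcol] at hget
            exact Option.some.inj hget
          · intro hcc
            exact ⟨(j' : Int), (pvMem_buildIndex colKeys r.2.1 (j' : Int)).mpr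
              (by simp [hcol, hcc]), by simp⟩
        by_cases hc : ck = r.2.1
        · rw [if_pos (hcond2.mpr hc)]
          simp only [List.getElem?_map, hcol, Option.map_some, Option.some.injEq]
          rw [pvFirstMatch_append, if_pos ⟨hk.symm, hc.symm⟩]
          cases hfm : pvFirstMatch p rk ck <;> simp [pvUpd]
        · rw [if_neg (fun h => hc (hcond2.mp h))]
          simp only [List.getElem?_map, hcol, Option.map_some, Option.some.injEq]
          rw [pvFirstMatch_append, if_neg (fun h => hc h.2.symm)]
    · rw [if_neg (fun h => hk (hcond.mp h)), h1, h2]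
      simp only [Option.some.injEq]
      apply List.map_congr_left
      intro ck _
      rw [pvFirstMatch_append, if_neg (fun h => hk h.1.symm)]

-- one lazy stateful step has the same grid effect as the plain scatter step on the extracted record
theorem pvScatterStep_fst {rho kr kc : Type} [BEq kr] [BEq kc]
    (rowKeys : List kr) (colKeys : List kc)
    (rkey : rho → kr) (ckey : rho → kc) (vkey : rho → Int)
    (st : List (List (Option Int)) × Option (PySem.Dict kr (List Int))) (rec : rho)
    (h : st.2 = none ∨ st.2 = some (pvBuildIndex rowKeys)) :
    (pvScatterStep (pvBuildIndex colKeys) rowKeys rkey ckey vkey st rec).1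
      = ((pvBuildIndex rowKeys).getD (rkey rec) []).foldl (fun g i =>
          ((pvBuildIndex colKeys).getD (ckey rec) []).foldl (fun g j =>
            g.modify i.toNat (fun row => row.modify j.toNat (pvUpd (vkey rec)))) g) st.1 := by
  have hrows : (match st.2 with
      | some d => d
      | none => pvBuildIndex rowKeys) = pvBuildIndex rowKeys := by
    rcases h with h | h <;> rw [h]
  unfold pvScatterStep
  simp only [hrows]
  split_ifs with h1 h2
  · rw [h1]
    exact (List.foldl_fixed _).symm
  · rw [h2]
    rfl
  · rfl

theorem pvScatterStep_snd {rho kr kc : Type} [BEq kr] [BEq kc]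
    (cols : PySem.Dict kc (List Int)) (rowKeys : List kr)
    (rkey : rho → kr) (ckey : rho → kc) (vkey : rho → Int)
    (st : List (List (Option Int)) × Option (PySem.Dict kr (List Int))) (rec : rho)
    (h : st.2 = none ∨ st.2 = some (pvBuildIndex rowKeys)) :
    (pvScatterStep cols rowKeys rkey ckey vkey st rec).2 = none ∨
      (pvScatterStep cols rowKeys rkey ckey vkey st rec).2 = some (pvBuildIndex rowKeys) := by
  have hrows : (match st.2 with
      | some d => d
      | none => pvBuildIndex rowKeys) = pvBuildIndex rowKeys := by
    rcases h with h | h <;> rw [h]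
  unfold pvScatterStep
  simp only [hrows]
  split_ifs <;> simp [h]

-- the whole lazy stateful fold computes the plain scatter fold over the extracted records
theorem pvLazyFold_fst {rho kr kc : Type} [BEq kr] [BEq kc]
    (rowKeys : List kr) (colKeys : List kc)
    (rkey : rho → kr) (ckey : rho → kc) (vkey : rho → Int)
    (records : List rho) (g : List (List (Option Int)))
    (ro : Option (PySem.Dict kr (List Int)))
    (hro : ro = none ∨ ro = some (pvBuildIndex rowKeys)) :
    (records.foldl (pvScatterStep (pvBuildIndex colKeys) rowKeys rkey ckey vkey) (g, ro)).1
      = (records.map (fun r => (rkey r, ckey r, vkey r))).foldl (fun g rec =>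
          ((pvBuildIndex rowKeys).getD rec.1 []).foldl (fun g i =>
            ((pvBuildIndex colKeys).getD rec.2.1 []).foldl (fun g j =>
              g.modify i.toNat (fun row => row.modify j.toNat (pvUpd rec.2.2))) g) g) g := by
  induction records generalizing g ro with
  | nil => rfl
  | cons r rest ih =>
    simp only [List.foldl_cons, List.map_cons]
    have hstep := pvScatterStep_fst rowKeys colKeys rkey ckey vkey (g, ro) r hro
    have hsnd := pvScatterStep_snd (pvBuildIndex colKeys) rowKeys rkey ckey vkey (g, ro) r hro
    rw [ih _ _ hsnd, hstep]

theorem pvMatchMatrix_eq {alpha rho kr kc : Type}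
    [BEq kr] [LawfulBEq kr] [DecidableEq kr] [BEq kc] [LawfulBEq kc] [DecidableEq kc]
    (rowItems : List alpha) (rowKey : alpha → kr) (colKeys : List kc) (records : List rho)
    (rkey : rho → kr) (ckey : rho → kc) (vkey : rho → Int) :
    pvMatchMatrix rowItems rowKey colKeys records rkey ckey vkey
      = (rowItems.map rowKey).map (fun rk => colKeys.map (fun ck =>
          (pvFirstMatch (records.map (fun r => (rkey r, ckey r, vkey r))) rk ck).getD 0)) := by
  have hfold : ∀ (recs' p : List (kr × kc × Int)),
      recs'.foldl (fun g rec =>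
        ((pvBuildIndex (rowItems.map rowKey)).getD rec.1 []).foldl (fun g i =>
          ((pvBuildIndex colKeys).getD rec.2.1 []).foldl (fun g j =>
            g.modify i.toNat (fun row => row.modify j.toNat (pvUpd rec.2.2))) g) g)
        (pvG (rowItems.map rowKey) colKeys p)
      = pvG (rowItems.map rowKey) colKeys (p ++ recs') := by
    intro recs'
    induction recs' with
    | nil => intro p; simp
    | cons r rest ih =>
      intro p
      simp only [List.foldl_cons, pvStep_G, ih]
      simp
  have h0 : (rowItems.map (fun _ => colKeys.map (fun _ => (none : Option Int))))
      = pvG (rowItems.map rowKey) colKeys [] := by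
    simp [pvG, pvFirstMatch, List.map_map, Function.comp_def]
  simp only [pvMatchMatrix]
  rw [h0, pvLazyFold_fst _ _ _ _ _ _ _ _ (Or.inl rfl)]
  have := hfold (records.map (fun r => (rkey r, ckey r, vkey r))) []
  simp only [List.nil_append] at this
  rw [this]
  simp [pvG, List.map_map, Function.comp_def]

theorem pvFindV_eq (vc : List (List Int)) (vr h : List Int) :
    pvFindV vc vr h =
      pvFirstMatch (vc.map (fun r => (r.getD 1 0, r.getD 0 0, r.getD 2 0))) (h.getD 0 0) (vr.getD 0 0) := by
  induction vc with
  | nil => rfl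
  | cons r rest ih =>
    simp only [pvFindV, List.map_cons, pvFirstMatch, ih]
    split_ifs with hA hB <;> first | rfl | tauto

theorem pvFindS_eq (sc : List (List Int)) (sr l : List Int) :
    pvFindS sc sr l =
      pvFirstMatch (sc.map (fun r => ((r.getD 2 0, r.getD 3 0), (r.getD 0 0, r.getD 1 0), r.getD 4 0)))
        (l.getD 0 0, l.getD 1 0) (sr.getD 0 0, sr.getD 1 0) := by
  induction sc with
  | nil => rfl
  | cons r rest ih =>
    simp only [pvFindS, List.map_cons, pvFirstMatch, ih, Prod.mk.injEq]
    split_ifs with hA hB <;> first | rfl | tauto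

-- ===== VERDICT (by name: the statement is the Claim_ definition above) =====
theorem get_final_costs_spec : Claim_equal_get_final_costs := by
  intro vc sc vs ss ls hs _ _
  unfold Spec_get_final_costs get_final_costs get_final_costs_alt
  simp only [Prod.mk.injEq]
  constructor
  · by_cases hg : vc ≠ [] ∧ vs ≠ [] ∧ hs ≠ []
    · rw [if_pos hg, pvMatchMatrix_eq]
      simp [List.map_map, Function.comp_def, pvFindV_eq]
    · rw [if_neg hg]
      by_cases h1 : vc = []
      · simp [h1, pvFindV]
      · by_cases h2 : vs = []
        · simp [h2]
        · by_cases h3 : hs = []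
          · simp [h3]
          · exact absurd ⟨h1, h2, h3⟩ hg
  · by_cases hg : sc ≠ [] ∧ ss ≠ [] ∧ ls ≠ []
    · rw [if_pos hg, pvMatchMatrix_eq]
      simp [List.map_map, Function.comp_def, pvFindS_eq]
    · rw [if_neg hg]
      by_cases h1 : sc = []
      · simp [h1, pvFindS]
      · by_cases h2 : ss = []
        · simp [h2]
        · by_cases h3 : ls = []
          · simp [h3]
          · exact absurd ⟨h1, h2, h3⟩ hg
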